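-- pv_equiv track=rewrite | github.com/BioGeMT/ParaDISM | giab_benchmark/atomize_equal_length_substitutions.py | atomize_record
-- ===== SOURCE A (Python) =====
-- def atomize_record(fields: list[str]) -> list[list[str]]:
--     if len(fields) < 8:
--         return []
--
--     ref = fields[3].upper()
--     alt = fields[4].upper()
--
--     if "," in alt:
--         return [fields]
--     if alt == "." or "<" in alt or ">" in alt or alt == "*":
--         return [fields]
--
--     start = 0
--     while start < len(ref) and start < len(alt) and ref[start] == alt[start]:
--         start += 1
--
--     end_ref = len(ref)
--     end_alt = len(alt)
--     while end_ref > start and end_alt > start and ref[end_ref - 1] == alt[end_alt - 1]: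
--         end_ref -= 1
--         end_alt -= 1
--
--     core_ref = ref[start:end_ref]
--     core_alt = alt[start:end_alt]
--
--     if len(core_ref) == 0 and len(core_alt) == 0:
--         return []
--
--     if len(core_ref) != len(core_alt) or len(core_ref) == 0:
--         return [fields]
--
--     pos0 = int(fields[1])
--     out_rows: list[list[str]] = []
--     for idx, (ref_base, alt_base) in enumerate(zip(core_ref, core_alt)):
--         if ref_base == alt_base:
--             continue
--         new_fields = fields.copy()
--         new_fields[1] = str(pos0 + start + idx)
--         new_fields[3] = ref_base
--         new_fields[4] = alt_base
--         out_rows.append(new_fields)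
--
--     return out_rows
-- ===== SOURCE B (Python) =====
-- def atomize_record(fields: list[str]) -> list[list[str]]:
--     if len(fields) < 8:
--         return []
--
--     ref = fields[3].upper()
--     alt = fields[4].upper()
--
--     if "," in alt:
--         return [fields]
--     if alt == "." or "<" in alt or ">" in alt or alt == "*":
--         return [fields]
--
--     # A length difference survives any common-prefix/suffix trimming, so the
--     # trim loops of the original are unnecessary: compare the full strings.
--     if len(ref) != len(alt):
--         return [fields]
--     if ref == alt:
--         return []
--
--     pos0 = int(fields[1])
--     return [
--         fields[:1] + [str(pos0 + idx)] + fields[2:3] + [rb, ab] + fields[5:]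
--         for idx, (rb, ab) in enumerate(zip(ref, alt))
--         if rb != ab
--     ]
-- ===== Notes on version B (the rewrite author's own statement) =====
-- stated objective: simpler
-- what changed: Dropped the two common-prefix/suffix trimming while-loops entirely: since a length difference is trim-invariant and equal-length trimmed cores differ exactly where the full strings differ, B decides the early returns by comparing the full uppercased REF/ALT and emits per-base rows from a single comprehension over enumerate(zip(ref, alt)), building each row by slicing/concatenation instead of copy-and-assign.
import Mathlib
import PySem

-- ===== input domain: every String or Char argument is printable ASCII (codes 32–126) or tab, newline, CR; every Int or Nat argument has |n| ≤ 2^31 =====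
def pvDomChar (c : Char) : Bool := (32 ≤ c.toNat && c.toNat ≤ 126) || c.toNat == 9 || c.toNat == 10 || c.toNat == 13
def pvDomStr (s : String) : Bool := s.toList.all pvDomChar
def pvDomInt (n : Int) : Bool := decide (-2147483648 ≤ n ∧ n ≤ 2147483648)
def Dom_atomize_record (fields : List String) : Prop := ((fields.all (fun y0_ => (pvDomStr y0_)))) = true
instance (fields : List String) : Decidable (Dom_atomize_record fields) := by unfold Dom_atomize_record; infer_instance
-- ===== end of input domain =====

-- B drops A's two prefix/suffix trimming while-loops (a length difference is trim-invariant and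
-- equal-length cores differ exactly where the full strings do) and emits rows by one
-- comprehension over the full strings; objective: simpler.


-- ===== PORT A =====
-- A's first while loop: advance `start` while both strings have an equal char there.
def aPref (r a : List Char) (start : Nat) : Nat :=
  if start < r.length ∧ start < a.length ∧ r.getD start ' ' = a.getD start ' '
  then aPref r a (start + 1)
  else start
termination_by r.length - start
decreasing_by omega

def aSuf (r a : List Char) (start endR endA : Nat) : Nat × Nat :=
  if start < endR ∧ start < endA ∧ r.getD (endR - 1) ' ' = a.getD (endA - 1) ' '
  then aSuf r a start (endR - 1) (endA - 1)
  else (endR, endA)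
termination_by endR
decreasing_by omega


def atomize_record (fields : List String) : List (List String) :=
  if fields.length < 8 then [] else
  let ref := PySem.Chars.upper (fields.getD 3 "").toList
  let alt := PySem.Chars.upper (fields.getD 4 "").toList
  if PySem.Chars.isIn [','] alt then [fields] else
  if alt = ['.'] ∨ PySem.Chars.isIn ['<'] alt ∨ PySem.Chars.isIn ['>'] alt ∨ alt = ['*'] then [fields] else
  let start := aPref ref alt 0
  let ends := aSuf ref alt start ref.length alt.length
  let coreRef := PySem.List.slice ref (some (start : Int)) (some (ends.1 : Int))
  let coreAlt := PySem.List.slice alt (some (start : Int)) (some (ends.2 : Int))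
  if coreRef.length = 0 ∧ coreAlt.length = 0 then [] else
  if coreRef.length ≠ coreAlt.length ∨ coreRef.length = 0 then [fields] else
  match PySem.Int.ofStr? (fields.getD 1 "") with
  | none => []
  | some pos0 =>
    (PySem.List.enumerate (coreRef.zip coreAlt) 0).foldl
      (fun acc p =>
        if p.2.1 = p.2.2 then acc
        else acc ++ [((fields.set 1 (PySem.Int.toStr (pos0 + (start : Int) + p.1))).set 3
                        (String.ofList [p.2.1])).set 4 (String.ofList [p.2.2])]) []

def atomize_record_alt (fields : List String) : List (List String) :=
  if fields.length < 8 then [] else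
  let ref := PySem.Chars.upper (fields.getD 3 "").toList
  let alt := PySem.Chars.upper (fields.getD 4 "").toList
  if PySem.Chars.isIn [','] alt then [fields] else
  if alt = ['.'] ∨ PySem.Chars.isIn ['<'] alt ∨ PySem.Chars.isIn ['>'] alt ∨ alt = ['*'] then [fields] else
  if ref.length ≠ alt.length then [fields] else
  if ref = alt then [] else
  match PySem.Int.ofStr? (fields.getD 1 "") with
  | none => []
  | some pos0 =>
    (PySem.List.enumerate (ref.zip alt) 0).filterMap
      (fun p =>
        if p.2.1 ≠ p.2.2 then
          some (PySem.List.slice fields none (some (1 : Int)) ++ [PySem.Int.toStr (pos0 + p.1)] ++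
                PySem.List.slice fields (some (2 : Int)) (some (3 : Int)) ++
                [String.ofList [p.2.1], String.ofList [p.2.2]] ++
                PySem.List.slice fields (some (5 : Int)) none)
        else none)


-- ===== PRECONDITION & SPEC =====
-- Pre_ excludes exactly the inputs on which A raises ValueError: records that reach the
-- per-base loop (≥ 8 fields, a plain equal-length substitution with REF ≠ ALT) whose POS
-- field fields[1] is not a valid Python int literal.  B raises the same ValueError there.
def Pre_atomize_record (fields : List String) : Prop :=
  (8 ≤ fields.length ∧
   PySem.Chars.isIn [','] (PySem.Chars.upper (fields.getD 4 "").toList) = false ∧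
   PySem.Chars.upper (fields.getD 4 "").toList ≠ ['.'] ∧
   PySem.Chars.isIn ['<'] (PySem.Chars.upper (fields.getD 4 "").toList) = false ∧
   PySem.Chars.isIn ['>'] (PySem.Chars.upper (fields.getD 4 "").toList) = false ∧
   PySem.Chars.upper (fields.getD 4 "").toList ≠ ['*'] ∧
   (PySem.Chars.upper (fields.getD 3 "").toList).length
     = (PySem.Chars.upper (fields.getD 4 "").toList).length ∧
   PySem.Chars.upper (fields.getD 3 "").toList ≠ PySem.Chars.upper (fields.getD 4 "").toList)
  → (PySem.Int.ofStr? (fields.getD 1 "")).isSome = true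
instance (fields : List String) : Decidable (Pre_atomize_record fields) := by
  unfold Pre_atomize_record; infer_instance

def pvWitness_atomize_record : List String :=
  ["chr1", "100", "rs1", "AC", "AG", "50", "PASS", "DP=10"]

def Spec_atomize_record (fields : List String) (out : List (List String)) : Prop :=
  out = atomize_record_alt fields
instance (fields : List String) (out : List (List String)) : Decidable (Spec_atomize_record fields out) := by
  unfold Spec_atomize_record; infer_instance

-- ===== CLAIM (what is proved, stated in full; the proofs are below) =====
def Claim_equal_atomize_record : Prop :=
  ∀ (fields : List String), Dom_atomize_record fields → Pre_atomize_record fields →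
    Spec_atomize_record fields (atomize_record fields)

-- ===== LEMMAS AND PROOFS =====
theorem aPref_le (r a : List Char) (s0 : Nat) :
    aPref r a s0 ≤ max s0 (min r.length a.length) := by
  induction s0 using aPref.induct r a with
  | case1 s0 h ih => rw [aPref, if_pos h]; omega
  | case2 s0 h => rw [aPref, if_neg h]; omega

theorem aPref_chars (r a : List Char) (s0 : Nat) :
    ∀ i, s0 ≤ i → i < aPref r a s0 → r.getD i ' ' = a.getD i ' ' := by
  induction s0 using aPref.induct r a with
  | case1 s0 h ih =>
    rw [aPref, if_pos h]
    intro i h1 h2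
    rcases Nat.eq_or_lt_of_le h1 with rfl | h1'
    · exact h.2.2
    · exact ih i h1' h2
  | case2 s0 h => rw [aPref, if_neg h]; omega

theorem aPref_full (r a : List Char) (s0 : Nat)
    (hlen : r.length = a.length) (hall : ∀ i < r.length, r.getD i ' ' = a.getD i ' ')
    (hs : s0 ≤ r.length) : aPref r a s0 = r.length := by
  induction s0 using aPref.induct r a with
  | case1 s0 h ih => rw [aPref, if_pos h]; exact ih (by omega)
  | case2 s0 h =>
    rw [aPref, if_neg h]
    rcases Nat.eq_or_lt_of_le hs with rfl | hs'
    · rfl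
    · exact absurd ⟨hs', by omega, hall s0 hs'⟩ h

theorem aSuf_bounds (r a : List Char) (s eR eA : Nat) (h1 : s ≤ eR) (h2 : s ≤ eA) :
    s ≤ (aSuf r a s eR eA).1 ∧ (aSuf r a s eR eA).1 ≤ eR ∧
    s ≤ (aSuf r a s eR eA).2 ∧ (aSuf r a s eR eA).2 ≤ eA ∧
    eR - (aSuf r a s eR eA).1 = eA - (aSuf r a s eR eA).2 := by
  induction eR, eA using aSuf.induct r a s with
  | case1 eR eA h ih =>
    rw [aSuf, if_pos h]
    have := ih (by omega) (by omega)
    omega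
  | case2 eR eA h => rw [aSuf, if_neg h]; omega

theorem aSuf_eq (r a : List Char) (s : Nat) : ∀ e, (aSuf r a s e e).2 = (aSuf r a s e e).1 := by
  intro e
  induction e using Nat.strong_induction_on with
  | _ e ih =>
    rw [aSuf]
    split
    · next h => exact ih (e - 1) (by omega)
    · rfl

theorem aSuf_chars (r a : List Char) (s : Nat) :
    ∀ e j, (aSuf r a s e e).1 ≤ j → j < e → r.getD j ' ' = a.getD j ' ' := by
  intro e
  induction e using Nat.strong_induction_on with
  | _ e ih =>
    rw [aSuf]
    split
    · next h =>
      intro j hj1 hj2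
      rcases Nat.lt_or_ge j (e - 1) with h' | h'
      · exact ih (e - 1) (by omega) j hj1 h'
      · have : j = e - 1 := by omega
        subst this; exact h.2.2
    · intro j h1 h2; omega


theorem filterMap_ite {α β : Type} (c : α → Prop) [DecidablePred c] (f : α → β) (l : List α) :
    l.filterMap (fun x => if c x then some (f x) else none)
      = (l.filter (fun x => decide (c x))).map f := by
  induction l with
  | nil => rfl
  | cons x xs ih =>
    by_cases h : c x <;> simp [h, ih]

theorem foldl_skip_if {α β : Type} (c : α → Prop) [DecidablePred c] (f : α → β)
    (l : List α) (b : List β) :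
    List.foldl (fun acc x => if c x then acc else acc ++ [f x]) b l
      = b ++ (l.filter (fun x => decide (¬ c x))).map f := by
  have h : (fun (acc : List β) x => if c x then acc else acc ++ [f x])
      = (fun (acc : List β) x => if (fun x => decide (¬ c x)) x then acc ++ [f x] else acc) := by
    funext acc x; by_cases h : c x <;> simp [h]
  rw [h, PySem.List.foldl_append_if]

theorem enumerate_shift {α : Type} (xs : List α) (s t : Int) :
    PySem.List.enumerate xs (s + t) = (PySem.List.enumerate xs t).map (fun p => (s + p.1, p.2)) := by
  induction xs generalizing t with
  | nil => simp [PySem.List.enumerate_nil]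
  | cons x xs ih =>
    rw [PySem.List.enumerate_cons, PySem.List.enumerate_cons, List.map_cons]
    have : s + t + 1 = s + (t + 1) := by omega
    rw [this, ih]

theorem rowEq (l : List String) (x : String) (c d : Char) (h : 8 ≤ l.length) :
    ((l.set 1 x).set 3 (String.ofList [c])).set 4 (String.ofList [d])
      = PySem.List.slice l none (some (1 : Int)) ++ [x] ++
        PySem.List.slice l (some (2 : Int)) (some (3 : Int)) ++
        [String.ofList [c], String.ofList [d]] ++
        PySem.List.slice l (some (5 : Int)) none := by
  match l with
  | a0 :: a1 :: a2 :: a3 :: a4 :: t =>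
    simp [PySem.List.slice, PySem.List.clampIdx, List.set]


theorem atomize_main (fields : List String)
    (hpre : ((8 ≤ fields.length ∧
   PySem.Chars.isIn [','] (PySem.Chars.upper (fields.getD 4 "").toList) = false ∧
   PySem.Chars.upper (fields.getD 4 "").toList ≠ ['.'] ∧
   PySem.Chars.isIn ['<'] (PySem.Chars.upper (fields.getD 4 "").toList) = false ∧
   PySem.Chars.isIn ['>'] (PySem.Chars.upper (fields.getD 4 "").toList) = false ∧
   PySem.Chars.upper (fields.getD 4 "").toList ≠ ['*'] ∧
   (PySem.Chars.upper (fields.getD 3 "").toList).length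
     = (PySem.Chars.upper (fields.getD 4 "").toList).length ∧
   PySem.Chars.upper (fields.getD 3 "").toList ≠ PySem.Chars.upper (fields.getD 4 "").toList)
  → (PySem.Int.ofStr? (fields.getD 1 "")).isSome = true)) :
    atomize_record fields = atomize_record_alt fields := by
  rw [atomize_record, atomize_record_alt]
  by_cases h8 : fields.length < 8
  · simp [h8]
  rw [if_neg h8, if_neg h8]
  set ref := PySem.Chars.upper (fields.getD 3 "").toList with href
  set alt := PySem.Chars.upper (fields.getD 4 "").toList with halt
  by_cases hc : PySem.Chars.isIn [','] alt
  · simp [hc]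
  rw [if_neg hc, if_neg hc]
  by_cases hsym : alt = ['.'] ∨ PySem.Chars.isIn ['<'] alt ∨ PySem.Chars.isIn ['>'] alt ∨ alt = ['*']
  · simp [hsym]
  rw [if_neg hsym, if_neg hsym]
  simp only []
  set s := aPref ref alt 0 with hs
  set ends := aSuf ref alt s ref.length alt.length with hends
  set coreRef := PySem.List.slice ref (some (s : Int)) (some (ends.1 : Int)) with hcr
  set coreAlt := PySem.List.slice alt (some (s : Int)) (some (ends.2 : Int)) with hca
  clear_value s ends coreRef coreAlt
  have hsle : s ≤ ref.length ∧ s ≤ alt.length := by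
    have h1 := aPref_le ref alt 0
    rw [← hs] at h1; omega
  by_cases hlen : ref.length = alt.length
  case neg =>
    rw [if_pos hlen]
    have hb := aSuf_bounds ref alt s ref.length alt.length hsle.1 hsle.2
    rw [← hends] at hb
    have hcrl : coreRef.length = ends.1 - s := by
      rw [hcr, PySem.List.length_slice]
      simp; omega
    have hcal : coreAlt.length = ends.2 - s := by
      rw [hca, PySem.List.length_slice]
      simp; omega
    have hor : coreRef.length ≠ coreAlt.length ∨ coreRef.length = 0 := Or.inl (by omega)
    rw [if_neg (by omega), if_pos hor]
  case pos =>
  rw [if_neg (show ¬(ref.length ≠ alt.length) from fun h => h hlen)]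
  by_cases hra : ref = alt
  case pos =>
    rw [if_pos hra]
    have hall : ∀ i < ref.length, ref.getD i ' ' = alt.getD i ' ' := by
      intro i _; rw [hra]
    have hs' : s = ref.length := by rw [hs]; exact aPref_full ref alt 0 hlen hall (by omega)
    have hends' : ends = (ref.length, alt.length) := by
      rw [hends, hs', aSuf, if_neg (by intro h; exact absurd h.1 (lt_irrefl _))]
    have hcrl : coreRef.length = 0 := by
      rw [hcr, PySem.List.length_slice, hends']
      simp; omega
    have hcal : coreAlt.length = 0 := by
      rw [hca, PySem.List.length_slice, hends']
      simp; omega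
    rw [if_pos ⟨hcrl, hcal⟩]
  case neg =>
  rw [if_neg hra]
  -- facts about the trim result in the equal-length, unequal-strings case
  have hlen' : alt.length = ref.length := hlen.symm
  rw [hlen'] at hends
  have heq2 : ends.2 = ends.1 := by rw [hends]; exact aSuf_eq ref alt s ref.length
  have hbnd := aSuf_bounds ref alt s ref.length ref.length hsle.1 hsle.1
  rw [← hends] at hbnd
  have hsufch : ∀ j, ends.1 ≤ j → j < ref.length → ref.getD j ' ' = alt.getD j ' ' := by
    rw [hends]; exact aSuf_chars ref alt s ref.length
  have hprech : ∀ i, i < s → ref.getD i ' ' = alt.getD i ' ' := by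
    rw [hs]; exact fun i hi => aPref_chars ref alt 0 i (Nat.zero_le i) hi
  have hne0 : ends.1 ≠ s := by
    intro h0
    apply hra
    apply List.ext_getElem hlen
    intro i h1 h2
    have hch : ref.getD i ' ' = alt.getD i ' ' := by
      rcases Nat.lt_or_ge i s with h' | h'
      · exact hprech i h'
      · exact hsufch i (by omega) h1
    rwa [List.getD_eq_getElem ref ' ' h1, List.getD_eq_getElem alt ' ' h2] at hch
  have hcrl : coreRef.length = ends.1 - s := by
    rw [hcr, PySem.List.length_slice]
    simp; omega
  have hcal : coreAlt.length = ends.1 - s := by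
    rw [hca, heq2, PySem.List.length_slice]
    simp; omega
  rw [if_neg (by omega), if_neg (by omega)]
  -- the POS field parses (Pre_)
  have hlt : PySem.Chars.isIn ['<'] alt = false := by
    by_contra h; simp only [Bool.not_eq_false] at h
    exact hsym (Or.inr (Or.inl h))
  have hgt : PySem.Chars.isIn ['>'] alt = false := by
    by_contra h; simp only [Bool.not_eq_false] at h
    exact hsym (Or.inr (Or.inr (Or.inl h)))
  have hsome := hpre ⟨by omega, by simpa using hc, fun h => hsym (Or.inl h), hlt, hgt,
    fun h => hsym (Or.inr (Or.inr (Or.inr h))), hlen, hra⟩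
  obtain ⟨pos0, hp⟩ := Option.isSome_iff_exists.mp hsome
  rw [hp]
  show List.foldl _ [] (PySem.List.enumerate (coreRef.zip coreAlt))
      = List.filterMap _ (PySem.List.enumerate (ref.zip alt))
  rw [foldl_skip_if (fun (p : Int × (Char × Char)) => p.2.1 = p.2.2)
        (fun p => ((fields.set 1 (PySem.Int.toStr (pos0 + (s : Int) + p.1))).set 3
            (String.ofList [p.2.1])).set 4 (String.ofList [p.2.2])),
      filterMap_ite (fun (p : Int × (Char × Char)) => p.2.1 ≠ p.2.2)
        (fun p => PySem.List.slice fields none (some (1 : Int)) ++ [PySem.Int.toStr (pos0 + p.1)] ++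
              PySem.List.slice fields (some (2 : Int)) (some (3 : Int)) ++
              [String.ofList [p.2.1], String.ofList [p.2.2]] ++
              PySem.List.slice fields (some (5 : Int)) none)]
  have hMr : coreRef = (ref.drop s).take (ends.1 - s) := by
    rw [hcr, PySem.List.slice_natCast]
  have hMa : coreAlt = (alt.drop s).take (ends.1 - s) := by
    rw [hca, heq2, PySem.List.slice_natCast]
  have hrefdec : ref = ref.take s ++ ((ref.drop s).take (ends.1 - s) ++ ref.drop ends.1) := by
    have h1 : ref.drop ends.1 = (ref.drop s).drop (ends.1 - s) := by
      rw [List.drop_drop]; congr 1; omega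
    rw [h1, List.take_append_drop, List.take_append_drop]
  have haltdec : alt = alt.take s ++ ((alt.drop s).take (ends.1 - s) ++ alt.drop ends.1) := by
    have h1 : alt.drop ends.1 = (alt.drop s).drop (ends.1 - s) := by
      rw [List.drop_drop]; congr 1; omega
    rw [h1, List.take_append_drop, List.take_append_drop]
  have hTlen : (ref.take s).length = (alt.take s).length := by
    simp [List.length_take]; omega
  have hMlen : ((ref.drop s).take (ends.1 - s)).length = ((alt.drop s).take (ends.1 - s)).length := by
    simp [List.length_take]; omega
  conv_rhs => rw [hrefdec, haltdec, List.zip_append hTlen, List.zip_append hMlen,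
    PySem.List.enumerate_append, PySem.List.enumerate_append,
    List.filter_append, List.filter_append, List.map_append, List.map_append]
  have hpre_nil : List.filter (fun (x : Int × (Char × Char)) => decide (x.2.1 ≠ x.2.2))
      (PySem.List.enumerate ((ref.take s).zip (alt.take s)) 0) = [] := by
    rw [List.filter_eq_nil_iff]
    intro p hp
    rw [PySem.List.mem_enumerate_iff] at hp
    obtain ⟨k, hk, rfl⟩ := hp
    have hks : k < s := by
      have := hk; simp [List.length_zip, List.length_take] at this; omega
    have h1 : k < ref.length := by omega
    have h2 : k < alt.length := by omega
    have hch := hprech k hks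
    rw [List.getD_eq_getElem ref ' ' h1, List.getD_eq_getElem alt ' ' h2] at hch
    simp [List.getElem_zip, List.getElem_take, hch]
  have hsuf_nil : ∀ (t : Int), List.filter (fun (x : Int × (Char × Char)) => decide (x.2.1 ≠ x.2.2))
      (PySem.List.enumerate ((ref.drop ends.1).zip (alt.drop ends.1)) t) = [] := by
    intro t
    rw [List.filter_eq_nil_iff]
    intro p hp
    rw [PySem.List.mem_enumerate_iff] at hp
    obtain ⟨k, hk, rfl⟩ := hp
    have hkl : k < ref.length - ends.1 := by
      have := hk; simp [List.length_zip, List.length_drop] at this; omega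
    have h1 : ends.1 + k < ref.length := by omega
    have h2 : ends.1 + k < alt.length := by omega
    have hch := hsufch (ends.1 + k) (by omega) h1
    rw [List.getD_eq_getElem ref ' ' h1, List.getD_eq_getElem alt ' ' h2] at hch
    simp [List.getElem_zip, List.getElem_drop, hch]
  rw [hpre_nil, hsuf_nil]
  simp only [List.map_nil, List.nil_append, List.append_nil]
  rw [hMr, hMa]
  have hofs : (0 : Int) + (((List.take s ref).zip (List.take s alt)).length : Int) = (s : Int) + 0 := by
    simp [List.length_zip]; omega
  rw [hofs, enumerate_shift, List.filter_map, List.map_map]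
  have hfun : ((fun (x : Int × (Char × Char)) => decide (x.2.1 ≠ x.2.2)) ∘
      (fun (p : Int × (Char × Char)) => ((s : Int) + p.1, p.2)))
      = fun (x : Int × (Char × Char)) => decide ¬x.2.1 = x.2.2 := by
    funext x; simp
  rw [hfun]
  apply List.map_congr_left
  intro p hp
  rw [rowEq fields _ p.2.1 p.2.2 (by omega)]
  simp only [Function.comp]
  rw [add_assoc]


-- ===== VERDICT (by name: the statement is the Claim_ definition above) =====
theorem atomize_record_spec : Claim_equal_atomize_record :=
  fun fields _ hpre => atomize_main fields hpre
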